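-- pv_equiv track=rewrite | github.com/uuinfolab/Structure_and_dynamics_of_growing_networks_of_Reddit_threads | src/utilities.py | compute_groups
-- ===== SOURCE A (Python) =====
-- def compute_groups(lst):
--     groups = {}
--     for tup in lst:
--         x, y, _ = tup
--         if (x, y) in groups:
--             groups[(x, y)].append(tup)
--         elif (y, x) in groups:
--             groups[(y, x)].append(tup)
--         else:
--             groups[(x, y)] = [tup]
--     grouped_tuples = list(groups.values())
--     return grouped_tuples
-- ===== SOURCE B (Python) =====
-- def compute_groups(lst):
--     keys = [(x, y) if x <= y else (y, x) for x, y, _ in lst]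
--     seen = []
--     for k in keys:
--         if k not in seen:
--             seen.append(k)
--     return [[t for t, kk in zip(lst, keys) if kk == k] for k in seen]
-- ===== Notes on version B (the rewrite author's own statement) =====
-- stated objective: alternative
-- what changed: Replaces A's single-pass dict grouping with two-orientation lookup by a staged dict-free pipeline: compute each tuple's canonical sorted-pair key, collect the distinct keys in first-appearance order, then build each group by a filter pass over the list per key.
import Mathlib
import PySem

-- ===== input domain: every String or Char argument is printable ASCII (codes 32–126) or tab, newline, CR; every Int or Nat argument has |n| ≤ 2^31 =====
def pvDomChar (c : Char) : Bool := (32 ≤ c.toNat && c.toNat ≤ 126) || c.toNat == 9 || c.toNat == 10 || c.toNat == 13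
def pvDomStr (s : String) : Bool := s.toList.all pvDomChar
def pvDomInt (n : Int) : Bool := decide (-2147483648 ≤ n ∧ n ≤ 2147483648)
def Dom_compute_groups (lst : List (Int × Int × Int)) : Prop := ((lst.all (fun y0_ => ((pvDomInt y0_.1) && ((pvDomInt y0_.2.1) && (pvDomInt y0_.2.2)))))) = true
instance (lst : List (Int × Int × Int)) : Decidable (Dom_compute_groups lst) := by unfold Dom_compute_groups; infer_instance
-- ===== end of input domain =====

-- B replaces A's single-pass dict grouping (two-orientation key lookup) by a staged,
-- dict-free pipeline: canonical keys, distinct keys in first-appearance order, then one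
-- filter pass per key; objective: alternative (not faster).


-- ===== PORT A =====
-- 'groups[k].append(tup)' is modeled as Dict.modify k [] (· ++ [tup]) (exact: the key is present on that branch)
def compute_groups (lst : List (Int × Int × Int)) : List (List (Int × Int × Int)) :=
  (lst.foldl (fun groups tup =>
      if groups.contains (tup.1, tup.2.1) then
        groups.modify (tup.1, tup.2.1) [] (fun v => v ++ [tup])
      else if groups.contains (tup.2.1, tup.1) then
        groups.modify (tup.2.1, tup.1) [] (fun v => v ++ [tup])
      else
        groups.insert (tup.1, tup.2.1) [tup])
    PySem.Dict.empty).values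

-- ===== PORT B =====
-- keys = [(x, y) if x <= y else (y, x) for x, y, _ in lst]
def cgKey (tup : Int × Int × Int) : Int × Int :=
  if tup.1 ≤ tup.2.1 then (tup.1, tup.2.1) else (tup.2.1, tup.1)

-- seen = []; for k in keys: if k not in seen: seen.append(k)
-- return [[t for t, kk in zip(lst, keys) if kk == k] for k in seen]
def compute_groups_alt (lst : List (Int × Int × Int)) : List (List (Int × Int × Int)) :=
  let keys := lst.map cgKey
  let seen := keys.foldl (fun s k => if s.contains k then s else s ++ [k]) ([] : List (Int × Int))
  seen.map (fun k => ((lst.zip keys).filter (fun p => p.2 == k)).map (fun p => p.1))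

-- ===== PRECONDITION & SPEC =====
def Spec_compute_groups (lst : List (Int × Int × Int)) (out : List (List (Int × Int × Int))) : Prop := out = compute_groups_alt lst
instance (lst : List (Int × Int × Int)) (out : List (List (Int × Int × Int))) : Decidable (Spec_compute_groups lst out) := by unfold Spec_compute_groups; infer_instance

-- ===== CLAIM (what is proved, stated in full; the proofs are below) =====
def Claim_equal_compute_groups : Prop := ∀ (lst : List (Int × Int × Int)), Dom_compute_groups lst → Spec_compute_groups lst (compute_groups lst)

-- ===== LEMMAS AND PROOFS =====

-- canonical (sorted) form of an unordered pair key
def cgCanon (p : Int × Int) : Int × Int := if p.1 ≤ p.2 then p else (p.2, p.1)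

lemma cgCanon_eq_iff (q : Int × Int) (x y : Int) :
    cgCanon q = cgCanon (x, y) ↔ q = (x, y) ∨ q = (y, x) := by
  rcases q with ⟨a, b⟩
  simp only [cgCanon, Prod.ext_iff]
  split_ifs <;> simp <;> omega

def cgF (p : (Int × Int) × List (Int × Int × Int)) : (Int × Int) × List (Int × Int × Int) :=
  (cgCanon p.1, p.2)

def cgRel (d e : PySem.Dict (Int × Int) (List (Int × Int × Int))) : Prop :=
  e.items = d.items.map cgF ∧ (d.items.map (fun p => cgCanon p.1)).Nodup

def cgStepA (groups : PySem.Dict (Int × Int) (List (Int × Int × Int))) (tup : Int × Int × Int) :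
    PySem.Dict (Int × Int) (List (Int × Int × Int)) :=
  if groups.contains (tup.1, tup.2.1) then
    groups.modify (tup.1, tup.2.1) [] (fun v => v ++ [tup])
  else if groups.contains (tup.2.1, tup.1) then
    groups.modify (tup.2.1, tup.1) [] (fun v => v ++ [tup])
  else
    groups.insert (tup.1, tup.2.1) [tup]

-- proof-side dict form of the canonical-key grouping (bridge between A and B)
def cgStepB (groups : PySem.Dict (Int × Int) (List (Int × Int × Int))) (tup : Int × Int × Int) :
    PySem.Dict (Int × Int) (List (Int × Int × Int)) :=
  groups.insert (cgKey tup) (groups.getD (cgKey tup) [] ++ [tup])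

lemma cgFind_congr {α : Type} (l : List α) (p q : α → Bool) (h : ∀ x ∈ l, p x = q x) :
    l.find? p = l.find? q := by
  induction l with
  | nil => rfl
  | cons a l ih =>
    simp only [List.find?]
    rw [h a (by simp)]
    cases q a
    · exact ih (fun x hx => h x (by simp [hx]))
    · rfl

lemma cgCanon_comm (x y : Int) : cgCanon (x, y) = cgCanon (y, x) := by
  simp only [cgCanon]
  split_ifs <;> simp [Prod.ext_iff] <;> omega

lemma cgStep_mod (d e : PySem.Dict (Int × Int) (List (Int × Int × Int))) (t : Int × Int × Int)
    (k : Int × Int)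
    (h1 : e.items = d.items.map cgF)
    (h2 : (d.items.map (fun p => cgCanon p.1)).Nodup)
    (hk : cgCanon k = cgKey t)
    (p0 : (Int × Int) × List (Int × Int × Int)) (hp0 : p0 ∈ d.items) (hpk : p0.1 = k) :
    cgRel (d.modify k [] (fun v => v ++ [t])) (cgStepB e t) := by
  have hinj := List.inj_on_of_nodup_map h2
  have huniq : ∀ p ∈ d.items, (cgCanon p.1 = cgKey t ↔ p.1 = k) := by
    intro p hp
    constructor
    · intro h
      have : p = p0 := hinj hp hp0 (by rw [h, ← hk, hpk])
      rw [this, hpk]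
    · intro h
      rw [h, hk]
  have hcontA : d.contains k = true := by
    simp only [PySem.Dict.contains, List.any_eq_true]
    exact ⟨p0, hp0, by simp [hpk]⟩
  have hcontB : e.contains (cgKey t) = true := by
    simp only [PySem.Dict.contains, h1, List.any_map, List.any_eq_true, Function.comp]
    refine ⟨p0, hp0, ?_⟩
    show ((cgF p0).1 == cgKey t) = true
    simp [cgF, hpk, hk]
  have hfind : d.items.find? (fun p => cgCanon p.1 == cgKey t)
      = d.items.find? (fun p => p.1 == k) := by
    apply cgFind_congr
    intro p hp
    by_cases h : p.1 = k
    · have : cgCanon p.1 = cgKey t := by rw [h, hk]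
      simp [h, hk]
    · have h2' : ¬ cgCanon p.1 = cgKey t := fun hcc => h ((huniq p hp).1 hcc)
      simp [h, h2']
  have hgetD : e.getD (cgKey t) [] = d.getD k [] := by
    simp only [PySem.Dict.getD, PySem.Dict.get?, h1, List.find?_map]
    have hpred : ((fun q : (Int × Int) × List (Int × Int × Int) => q.1 == cgKey t) ∘ cgF)
        = (fun p : (Int × Int) × List (Int × Int × Int) => cgCanon p.1 == cgKey t) := rfl
    rw [hpred, hfind, Option.map_map]
    rfl
  constructor
  · show (cgStepB e t).items = _
    simp only [cgStepB, PySem.Dict.modify,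
      PySem.Dict.items_insert_of_contains _ _ hcontB,
      PySem.Dict.items_insert_of_contains _ _ hcontA, h1,
      List.map_map]
    apply List.map_congr_left
    intro p hp
    by_cases h : p.1 = k
    · have hcc : cgCanon p.1 = cgKey t := by rw [h, hk]
      simp only [Function.comp]
      show (if ((cgF p).1 == cgKey t) = true then _ else _) = cgF _
      simp [cgF, h, hgetD, hk]
    · have h2' : ¬ cgCanon p.1 = cgKey t := fun hcc => h ((huniq p hp).1 hcc)
      simp only [Function.comp]
      show (if ((cgF p).1 == cgKey t) = true then _ else _) = cgF _
      simp [cgF, h2', h]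
  · show ((d.modify k [] (fun v => v ++ [t])).items.map (fun p => cgCanon p.1)).Nodup
    simp only [PySem.Dict.modify, PySem.Dict.items_insert_of_contains _ _ hcontA,
      List.map_map]
    have : (d.items.map ((fun p : (Int × Int) × List (Int × Int × Int) => cgCanon p.1) ∘
        (fun p => if (p.1 == k) = true then (k, d.getD k [] ++ [t]) else p)))
        = d.items.map (fun p => cgCanon p.1) := by
      apply List.map_congr_left
      intro p hp
      by_cases h : p.1 = k
      · simp [Function.comp, h]
      · simp [Function.comp, h]
    rw [this]
    exact h2

lemma cgStep (d e : PySem.Dict (Int × Int) (List (Int × Int × Int))) (t : Int × Int × Int)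
    (h : cgRel d e) : cgRel (cgStepA d t) (cgStepB e t) := by
  obtain ⟨h1, h2⟩ := h
  by_cases hc1 : d.contains (t.1, t.2.1) = true
  · obtain ⟨p0, hp0, hpk⟩ := List.any_eq_true.1 hc1
    rw [show cgStepA d t = d.modify (t.1, t.2.1) [] (fun v => v ++ [t]) by
      simp [cgStepA, hc1]]
    exact cgStep_mod d e t (t.1, t.2.1) h1 h2 rfl p0 hp0 (by simpa using hpk)
  · by_cases hc2 : d.contains (t.2.1, t.1) = true
    · obtain ⟨p0, hp0, hpk⟩ := List.any_eq_true.1 hc2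
      rw [show cgStepA d t = d.modify (t.2.1, t.1) [] (fun v => v ++ [t]) by
        simp [cgStepA, hc1, hc2]]
      exact cgStep_mod d e t (t.2.1, t.1) h1 h2 (cgCanon_comm t.2.1 t.1) p0 hp0
        (by simpa using hpk)
    · have hno : ∀ p ∈ d.items, ¬ cgCanon p.1 = cgKey t := by
        intro p hp hcc
        rcases (cgCanon_eq_iff p.1 t.1 t.2.1).1 hcc with h | h
        · exact hc1 (List.any_eq_true.2 ⟨p, hp, by simp [h]⟩)
        · exact hc2 (List.any_eq_true.2 ⟨p, hp, by simp [h]⟩)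
      have hcontB : e.contains (cgKey t) = false := by
        simp only [PySem.Dict.contains, h1, List.any_map]
        apply List.any_eq_false.2
        intro p hp
        show ¬ ((cgF p).1 == cgKey t) = true
        simp [cgF, hno p hp]
      have hget : e.getD (cgKey t) [] = [] := by
        simp only [PySem.Dict.getD, PySem.Dict.get?, h1, List.find?_map]
        have : d.items.find? ((fun q : (Int × Int) × List (Int × Int × Int) =>
            q.1 == cgKey t) ∘ cgF) = none := by
          apply List.find?_eq_none.2
          intro p hp
          show ¬ ((cgF p).1 == cgKey t) = true
          simp [cgF, hno p hp]
        rw [this]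
        rfl
      rw [show cgStepA d t = d.insert (t.1, t.2.1) [t] by simp [cgStepA, hc1, hc2]]
      constructor
      · show (cgStepB e t).items = _
        simp only [cgStepB,
          PySem.Dict.items_insert_of_not_contains _ _ hcontB,
          PySem.Dict.items_insert_of_not_contains _ _ (by simpa using hc1), h1, hget,
          List.map_append]
        rfl
      · show ((d.insert (t.1, t.2.1) [t]).items.map (fun p => cgCanon p.1)).Nodup
        simp only [PySem.Dict.items_insert_of_not_contains _ _ (by simpa using hc1),
          List.map_append]
        simp only [List.map_cons, List.map_nil]
        rw [List.nodup_append]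
        refine ⟨h2, by simp, ?_⟩
        intro a ha b hb hab
        simp only [List.mem_map] at ha
        obtain ⟨p, hp, hpa⟩ := ha
        simp only [List.mem_singleton] at hb
        exact hno p hp (hpa.trans (hab.trans hb))

lemma cgMain (lst : List (Int × Int × Int)) (d e : PySem.Dict (Int × Int) (List (Int × Int × Int)))
    (h : cgRel d e) : cgRel (lst.foldl cgStepA d) (lst.foldl cgStepB e) := by
  induction lst generalizing d e with
  | nil => exact h
  | cons t rest ih => exact ih _ _ (cgStep d e t h)

-- ---- bridge from the dict fold cgStepB to B's staged seen/filter pipeline ----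

def cgSeen (lst : List (Int × Int × Int)) : List (Int × Int) :=
  lst.foldl (fun s t => if s.contains (cgKey t) then s else s ++ [cgKey t]) []

lemma cgZip (lst : List (Int × Int × Int)) (k : Int × Int) :
    ((lst.zip (lst.map cgKey)).filter (fun p => p.2 == k)).map (fun p => p.1)
      = lst.filter (fun t => cgKey t == k) := by
  induction lst with
  | nil => rfl
  | cons a l ih =>
    simp only [List.map_cons, List.zip_cons_cons, List.filter_cons]
    by_cases h : cgKey a = k
    · simp [h, ih]
    · simp [h, ih]

lemma cgMem_foldl (p : List (Int × Int × Int)) (s : List (Int × Int)) (k : Int × Int) :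
    k ∈ p.foldl (fun s t => if s.contains (cgKey t) then s else s ++ [cgKey t]) s
      ↔ k ∈ s ∨ ∃ t ∈ p, cgKey t = k := by
  induction p generalizing s with
  | nil => simp
  | cons a p ih =>
    simp only [List.foldl_cons, ih]
    have hs' : k ∈ (if s.contains (cgKey a) then s else s ++ [cgKey a]) ↔
        k ∈ s ∨ k = cgKey a := by
      split_ifs with h
      · constructor
        · exact Or.inl
        · rintro (h1 | rfl)
          · exact h1
          · simpa using h
      · simp [List.mem_append]
    rw [hs']
    constructor
    · rintro ((h1 | rfl) | ⟨t, ht, rfl⟩)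
      · exact Or.inl h1
      · exact Or.inr ⟨a, List.mem_cons_self, rfl⟩
      · exact Or.inr ⟨t, List.mem_cons_of_mem a ht, rfl⟩
    · rintro (h1 | ⟨t, ht, rfl⟩)
      · exact Or.inl (Or.inl h1)
      · rcases List.mem_cons.1 ht with rfl | ht
        · exact Or.inl (Or.inr rfl)
        · exact Or.inr ⟨t, ht, rfl⟩

lemma cgNodup_foldl (p : List (Int × Int × Int)) (s : List (Int × Int)) (h : s.Nodup) :
    (p.foldl (fun s t => if s.contains (cgKey t) then s else s ++ [cgKey t]) s).Nodup := by
  induction p generalizing s with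
  | nil => exact h
  | cons a p ih =>
    simp only [List.foldl_cons]
    by_cases hc : s.contains (cgKey a) = true
    · rw [if_pos hc]; exact ih s h
    · have hk : cgKey a ∉ s := fun hm => hc (by simpa using hm)
      rw [if_neg (by simpa using hk)]
      refine ih _ (List.nodup_append.2 ⟨h, List.nodup_singleton _, ?_⟩)
      intro x hx y hy
      simp only [List.mem_singleton] at hy
      subst hy
      exact fun hxy => hk (hxy ▸ hx)

lemma cgSeen_append (p : List (Int × Int × Int)) (t : Int × Int × Int) :
    cgSeen (p ++ [t]) = if (cgSeen p).contains (cgKey t) then cgSeen p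
      else cgSeen p ++ [cgKey t] := by
  unfold cgSeen
  rw [List.foldl_append]
  rfl

lemma cgBitems (lst : List (Int × Int × Int)) :
    (lst.foldl cgStepB PySem.Dict.empty).items
      = (cgSeen lst).map (fun k => (k, lst.filter (fun t => cgKey t == k))) := by
  induction lst using List.reverseRecOn with
  | nil => rfl
  | append_singleton p t ih =>
    have hkeys : (p.foldl cgStepB PySem.Dict.empty).items.map Prod.fst = cgSeen p := by
      rw [ih, List.map_map]
      have hid : (Prod.fst ∘ fun k : Int × Int => (k, p.filter (fun t => cgKey t == k))) = id :=
        funext (fun k => rfl)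
      rw [hid, List.map_id]
    have hfold : (p ++ [t]).foldl cgStepB PySem.Dict.empty
        = cgStepB (p.foldl cgStepB PySem.Dict.empty) t := by
      simp [List.foldl_append]
    set d := p.foldl cgStepB PySem.Dict.empty with hd
    by_cases hc : (cgSeen p).contains (cgKey t) = true
    · have hmem : cgKey t ∈ cgSeen p := by simpa using hc
      have hmemitem : (cgKey t, p.filter (fun t' => cgKey t' == cgKey t)) ∈ d.items := by
        rw [ih]; exact List.mem_map.2 ⟨cgKey t, hmem, rfl⟩
      have hcont : d.contains (cgKey t) = true := by
        simp only [PySem.Dict.contains, List.any_eq_true]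
        exact ⟨(cgKey t, p.filter (fun t' => cgKey t' == cgKey t)), hmemitem, by simp⟩
      have hnd : d.keys.Nodup := by
        show (d.items.map Prod.fst).Nodup
        rw [hkeys]; exact cgNodup_foldl p [] List.nodup_nil
      have hget : d.getD (cgKey t) [] = p.filter (fun t' => cgKey t' == cgKey t) :=
        PySem.Dict.getD_of_mem_items d hmemitem hnd []
      rw [hfold]
      show (d.insert (cgKey t) (d.getD (cgKey t) [] ++ [t])).items = _
      rw [PySem.Dict.items_insert_of_contains _ _ hcont, ih, List.map_map,
        cgSeen_append, if_pos hc]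
      apply List.map_congr_left
      intro j hj
      simp only [Function.comp]
      by_cases hjk : j = cgKey t
      · subst hjk
        simp [hget, List.filter_append]
      · have hne : (cgKey t == j) = false := by
          simp only [beq_eq_false_iff_ne, ne_eq]
          exact fun h => hjk h.symm
        simp [hjk, List.filter_append, hne]
    · have hnomem : cgKey t ∉ cgSeen p := fun hm => hc (by simpa using hm)
      have hcont : d.contains (cgKey t) = false := by
        simp only [PySem.Dict.contains]
        apply List.any_eq_false.2
        intro q hq
        rw [ih] at hq
        obtain ⟨j, hj, rfl⟩ := List.mem_map.1 hq
        simp only [beq_iff_eq]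
        exact fun h => hnomem (h ▸ hj)
      have hget : d.getD (cgKey t) [] = [] := PySem.Dict.getD_of_not_contains d [] hcont
      have hfilt : p.filter (fun t' => cgKey t' == cgKey t) = [] := by
        apply List.filter_eq_nil_iff.2
        intro t' ht'
        simp only [beq_iff_eq]
        intro h
        exact hnomem ((cgMem_foldl p [] (cgKey t)).2 (Or.inr ⟨t', ht', h⟩))
      rw [hfold]
      show (d.insert (cgKey t) (d.getD (cgKey t) [] ++ [t])).items = _
      rw [PySem.Dict.items_insert_of_not_contains _ _ hcont, ih, hget,
        cgSeen_append, if_neg (by simpa using hnomem)]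
      rw [List.map_append]
      congr 1
      · apply List.map_congr_left
        intro j hj
        have hne : (cgKey t == j) = false := by
          simp only [beq_eq_false_iff_ne, ne_eq]
          exact fun h => hnomem (h ▸ hj)
        simp [List.filter_append, hne]
      · simp [List.filter_append, hfilt]

-- ===== VERDICT (by name: the statement is the Claim_ definition above) =====
theorem compute_groups_spec : Claim_equal_compute_groups := by
  intro lst _
  show compute_groups lst = compute_groups_alt lst
  have h := cgMain lst PySem.Dict.empty PySem.Dict.empty ⟨rfl, List.nodup_nil⟩
  have hA : compute_groups lst = ((lst.foldl cgStepA PySem.Dict.empty).items).map (fun p => p.2) := rfl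
  have hB : compute_groups_alt lst
      = (cgSeen lst).map (fun k =>
          ((lst.zip (lst.map cgKey)).filter (fun p => p.2 == k)).map (fun p => p.1)) := by
    show ((lst.map cgKey).foldl (fun s k => if s.contains k then s else s ++ [k]) []).map _ = _
    rw [List.foldl_map]
    rfl
  rw [hA, hB]
  have : ((lst.foldl cgStepA PySem.Dict.empty).items).map (fun p => p.2)
      = ((lst.foldl cgStepB PySem.Dict.empty).items).map (fun p => p.2) := by
    rw [h.1, List.map_map]; rfl
  rw [this, cgBitems, List.map_map]
  apply List.map_congr_left
  intro k hk
  simp only [Function.comp]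
  exact (cgZip lst k).symm
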